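-- pv_equiv track=rewrite | github.com/Cinder871169/Python | Thuc Hanh/TH2/5.py | min_steps_to_equal
-- ===== SOURCE A (Python) =====
-- def min_steps_to_equal(arr):
--     min_steps = float("inf")
--     best_value = -1
--     for target in arr:
--         steps = sum(abs(a - target) for a in arr)
--         if steps < min_steps:
--             min_steps = steps
--             best_value = target
--
--     return min_steps, best_value
-- ===== SOURCE B (Python) =====
-- def min_steps_to_equal(arr):
--     # Sort once; a single prefix-sum sweep gives the total absolute deviation
--     # for every distinct value; then one pass in original order keeps the
--     # first strict minimum (same tie-breaking as A).
--     s = sorted(arr)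
--     n = len(s)
--     total = sum(s)
--     cost = {}
--     pre = 0
--     for i, v in enumerate(s):
--         cost[v] = v * i - pre + (total - pre) - v * (n - i)
--         pre += v
--     min_steps = None
--     best_value = -1
--     for t in arr:
--         c = cost[t]
--         if min_steps is None or c < min_steps:
--             min_steps = c
--             best_value = t
--     return min_steps, best_value
-- ===== Notes on version B (the rewrite author's own statement) =====
-- stated objective: faster
-- what changed: Replaced the quadratic all-pairs rescan (sum of |a-t| recomputed for every target) by sort + one prefix-sum sweep that computes each value's total absolute deviation in closed form into a dict, followed by a single pass over the original order keeping the first strict minimum.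
-- outside the precondition, e.g. on min_steps_to_equal([]): A returns (inf, -1), B returns (None, -1)
import Mathlib
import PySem

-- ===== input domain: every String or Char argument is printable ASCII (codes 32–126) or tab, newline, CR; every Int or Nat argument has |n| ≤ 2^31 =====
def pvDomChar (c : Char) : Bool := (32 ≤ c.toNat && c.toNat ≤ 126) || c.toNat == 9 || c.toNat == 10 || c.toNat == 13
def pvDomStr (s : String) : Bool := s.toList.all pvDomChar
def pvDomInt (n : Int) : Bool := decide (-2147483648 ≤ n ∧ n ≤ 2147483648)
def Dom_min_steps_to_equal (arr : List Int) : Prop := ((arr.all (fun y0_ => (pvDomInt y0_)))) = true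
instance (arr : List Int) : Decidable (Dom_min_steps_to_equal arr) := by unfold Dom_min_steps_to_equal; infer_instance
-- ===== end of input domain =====

-- B replaces A's quadratic rescan by sort + one prefix-sum sweep into a dict plus one
-- original-order pass (faster, asymptotic: O(n log n) vs O(n^2)); return values proved equal
-- on nonempty lists (on [] A returns float inf, outside the Int return type).

-- ===== PORT A =====
-- inner generator sum: sum(abs(a - target) for a in arr)
def pvSumAbs (arr : List Int) (target : Int) : Int :=
  arr.foldl (fun acc a => acc + |a - target|) 0

-- min_steps = float("inf") is modelled as `none` (compares greater than every steps value);
-- on the empty list A returns the float inf, which Pre_ excludes, so getD's default is unreachable.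
def min_steps_to_equal (arr : List Int) : Int × Int :=
  let st := arr.foldl (fun (st : Option Int × Int) target =>
      let steps := pvSumAbs arr target
      match st.1 with
      | none => (some steps, target)
      | some m => if steps < m then (some steps, target) else st)
    ((none : Option Int), -1)
  (st.1.getD 0, st.2)

-- ===== PORT B =====
def min_steps_to_equal_alt (arr : List Int) : Int × Int :=
  let s := PySem.List.sorted arr (fun x => x) false
  let n : Int := (s.length : Int)
  let total := s.sum
  let build := (PySem.List.enumerate s).foldl
    (fun (st : Int × PySem.Dict Int Int) p =>
      (st.1 + p.2, st.2.insert p.2 (p.2 * p.1 - st.1 + (total - st.1) - p.2 * (n - p.1))))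
    (0, PySem.Dict.empty)
  -- cost[t]: t is always a key (t ∈ arr = keys of the dict), so the default is unreachable
  let fin := arr.foldl (fun (st : Option Int × Int) t =>
      let c := build.2.getD t 0
      match st.1 with
      | none => (some c, t)
      | some m => if c < m then (some c, t) else st)
    ((none : Option Int), -1)
  (fin.1.getD 0, fin.2)

-- ===== PRECONDITION & SPEC =====
-- Pre_ excludes only the empty list, on which A returns (float('inf'), -1): a float, not an Int.
def Pre_min_steps_to_equal (arr : List Int) : Prop := arr ≠ []
instance (arr : List Int) : Decidable (Pre_min_steps_to_equal arr) := by
  unfold Pre_min_steps_to_equal; infer_instance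
def pvWitness_min_steps_to_equal : List Int := [1, 5, 2]

def Spec_min_steps_to_equal (arr : List Int) (out : Int × Int) : Prop := out = min_steps_to_equal_alt arr
instance (arr : List Int) (out : Int × Int) : Decidable (Spec_min_steps_to_equal arr out) := by unfold Spec_min_steps_to_equal; infer_instance

-- ===== CLAIM (what is proved, stated in full; the proofs are below) =====
def Claim_equal_min_steps_to_equal : Prop := ∀ (arr : List Int), Dom_min_steps_to_equal arr → Pre_min_steps_to_equal arr → Spec_min_steps_to_equal arr (min_steps_to_equal arr)

-- ===== LEMMAS AND PROOFS =====

-- A's foldl sum is the map-sum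
theorem pvSumAbs_eq_map_sum (arr : List Int) (t : Int) :
    pvSumAbs arr t = (arr.map (fun a => |a - t|)).sum := by
  unfold pvSumAbs
  rw [PySem.List.foldl_add]
  simp

theorem pvAbsSum_le (l : List Int) (t : Int) (h : ∀ a ∈ l, a ≤ t) :
    (l.map (fun a => |a - t|)).sum = t * l.length - l.sum := by
  induction l with
  | nil => simp
  | cons x xs ih =>
      have hx : x ≤ t := h x (by simp)
      have hxs := ih (fun a ha => h a (by simp [ha]))
      simp only [List.map_cons, List.sum_cons, List.length_cons, hxs]
      rw [abs_of_nonpos (by omega)]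
      push_cast; ring

theorem pvAbsSum_ge (l : List Int) (t : Int) (h : ∀ a ∈ l, t ≤ a) :
    (l.map (fun a => |a - t|)).sum = l.sum - t * l.length := by
  induction l with
  | nil => simp
  | cons x xs ih =>
      have hx : t ≤ x := h x (by simp)
      have hxs := ih (fun a ha => h a (by simp [ha]))
      simp only [List.map_cons, List.sum_cons, List.length_cons, hxs]
      rw [abs_of_nonneg (by omega)]
      push_cast; ring

-- closed form for total absolute deviation around a split point
theorem pvSplitSum (l1 l2 : List Int) (t : Int)
    (h1 : ∀ a ∈ l1, a ≤ t) (h2 : ∀ a ∈ l2, t ≤ a) :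
    ((l1 ++ l2).map (fun a => |a - t|)).sum
      = t * l1.length - l1.sum + (l2.sum - t * l2.length) := by
  rw [List.map_append, List.sum_append, pvAbsSum_le l1 t h1, pvAbsSum_ge l2 t h2]

-- dict built by the sweep maps every key it holds to the total absolute deviation over s
theorem pvBuild_inv (total nn : Int) (rest : List Int) :
    ∀ (ctx : List Int) (d : PySem.Dict Int Int),
    (ctx ++ rest).Pairwise (· ≤ ·) →
    total = (ctx ++ rest).sum → nn = ((ctx ++ rest).length : Int) →
    (∀ v x, d.get? v = some x → x = ((ctx ++ rest).map (fun a => |a - v|)).sum) →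
    (∀ v ∈ ctx, (d.get? v).isSome) →
    (∀ v x, ((PySem.List.enumerate rest (ctx.length : Int)).foldl
        (fun (st : Int × PySem.Dict Int Int) p =>
          (st.1 + p.2, st.2.insert p.2 (p.2 * p.1 - st.1 + (total - st.1) - p.2 * (nn - p.1))))
        (ctx.sum, d)).2.get? v = some x → x = ((ctx ++ rest).map (fun a => |a - v|)).sum) ∧
    (∀ v ∈ ctx ++ rest, (((PySem.List.enumerate rest (ctx.length : Int)).foldl
        (fun (st : Int × PySem.Dict Int Int) p =>
          (st.1 + p.2, st.2.insert p.2 (p.2 * p.1 - st.1 + (total - st.1) - p.2 * (nn - p.1))))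
        (ctx.sum, d)).2.get? v).isSome) := by
  induction rest with
  | nil =>
      intro ctx d _ _ _ hd hk
      simp only [PySem.List.enumerate_nil, List.foldl_nil]
      exact ⟨by simpa using hd, by simpa using hk⟩
  | cons v rest ih =>
      intro ctx d hs htot hn hd hk
      rw [PySem.List.enumerate_cons, List.foldl_cons]
      have hassoc : ctx ++ v :: rest = (ctx ++ [v]) ++ rest := by simp
      have h1 : ∀ a ∈ ctx, a ≤ v := by
        have hcross := (List.pairwise_append.mp hs).2.2
        exact fun a ha => hcross a ha v (by simp)
      have h2 : ∀ a ∈ v :: rest, v ≤ a := by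
        have hp := (List.pairwise_append.mp hs).2.1
        intro a ha
        rcases List.mem_cons.mp ha with h | h
        · exact le_of_eq h.symm
        · exact (List.pairwise_cons.mp hp).1 a h
      have hcost : v * (ctx.length : Int) - ctx.sum + (total - ctx.sum) - v * (nn - (ctx.length : Int))
          = ((ctx ++ v :: rest).map (fun a => |a - v|)).sum := by
        rw [pvSplitSum ctx (v :: rest) v h1 h2, htot, hn]
        simp only [List.sum_append, List.length_append, List.sum_cons, List.length_cons]
        push_cast
        ring
      have hd' : ∀ v' x, (d.insert v (v * (ctx.length : Int) - ctx.sum + (total - ctx.sum) - v * (nn - (ctx.length : Int)))).get? v' = some x →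
          x = ((ctx ++ v :: rest).map (fun a => |a - v'|)).sum := by
        intro v' x hx
        by_cases hvv : v' = v
        · subst hvv
          rw [PySem.Dict.get?_insert_self] at hx
          rw [← hcost]
          exact (Option.some.injEq _ _ ▸ hx).symm ▸ rfl
        · rw [PySem.Dict.get?_insert_of_ne _ _ hvv] at hx
          exact hd v' x hx
      have hk' : ∀ v' ∈ ctx ++ [v], ((d.insert v (v * (ctx.length : Int) - ctx.sum + (total - ctx.sum) - v * (nn - (ctx.length : Int)))).get? v').isSome := by
        intro v' hv'
        by_cases hvv : v' = v
        · subst hvv; rw [PySem.Dict.get?_insert_self]; rfl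
        · rw [PySem.Dict.get?_insert_of_ne _ _ hvv]
          rcases List.mem_append.mp hv' with h | h
          · exact hk v' h
          · simp at h; exact absurd h hvv
      have e1 : ctx.sum + v = (ctx ++ [v]).sum := by simp
      have e2 : (ctx.length : Int) + 1 = (((ctx ++ [v]).length : Nat) : Int) := by
        simp
      have := ih (ctx ++ [v])
        (d.insert v (v * (ctx.length : Int) - ctx.sum + (total - ctx.sum) - v * (nn - (ctx.length : Int))))
        (by rw [← hassoc]; exact hs) (by rw [← hassoc]; exact htot) (by rw [← hassoc]; exact hn)
        (fun v' x hx => (hassoc ▸ hd' v' x hx)) hk'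
      rw [← e1, ← e2] at this
      refine ⟨fun v' x hx => ?_, fun v' hv' => ?_⟩
      · rw [hassoc]; exact this.1 v' x hx
      · exact this.2 v' (by rw [← hassoc]; exact hv')

-- both final loops coincide: the dict lookup returns the total absolute deviation
theorem pv_main (arr : List Int) : min_steps_to_equal arr = min_steps_to_equal_alt arr := by
  have hperm := PySem.List.sorted_perm arr (fun x => x) false
  have hpair : (PySem.List.sorted arr (fun x => x) false).Pairwise (· ≤ ·) := by
    simpa using PySem.List.sorted_pairwise arr (fun x => x)
  have hbuild := pvBuild_inv (PySem.List.sorted arr (fun x => x) false).sum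
      ((PySem.List.sorted arr (fun x => x) false).length : Int)
      (PySem.List.sorted arr (fun x => x) false) [] PySem.Dict.empty
      (by simpa using hpair) (by simp) (by simp)
      (by intro v x hx; rw [PySem.Dict.get?_empty] at hx; exact absurd hx (by simp))
      (by simp)
  simp only [List.nil_append, List.length_nil, Nat.cast_zero, List.sum_nil] at hbuild
  have hlook : ∀ t ∈ arr,
      (((PySem.List.enumerate (PySem.List.sorted arr (fun x => x) false) 0).foldl
        (fun (st : Int × PySem.Dict Int Int) p =>
          (st.1 + p.2, st.2.insert p.2 (p.2 * p.1 - st.1 +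
            ((PySem.List.sorted arr (fun x => x) false).sum - st.1) -
            p.2 * (((PySem.List.sorted arr (fun x => x) false).length : Int) - p.1))))
        (0, PySem.Dict.empty)).2.getD t 0) = pvSumAbs arr t := by
    intro t ht
    have htmem : t ∈ PySem.List.sorted arr (fun x => x) false := by
      rw [PySem.List.mem_sorted]; exact ht
    have hsome := hbuild.2 t htmem
    rcases Option.isSome_iff_exists.mp hsome with ⟨x, hx⟩
    have hval := hbuild.1 t x hx
    rw [PySem.Dict.getD_eq_get?_getD, hx, Option.getD_some, hval,
        pvSumAbs_eq_map_sum]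
    exact ((hperm.map (fun a => |a - t|)).sum_eq)
  simp only [min_steps_to_equal, min_steps_to_equal_alt]
  have hfold :
      arr.foldl (fun (st : Option Int × Int) target =>
        match st.1 with
        | none => (some (pvSumAbs arr target), target)
        | some m => if pvSumAbs arr target < m then (some (pvSumAbs arr target), target) else st)
        ((none : Option Int), -1)
      = arr.foldl (fun (st : Option Int × Int) t =>
        match st.1 with
        | none => (some (((PySem.List.enumerate (PySem.List.sorted arr (fun x => x) false) 0).foldl
            (fun (st : Int × PySem.Dict Int Int) p =>
              (st.1 + p.2, st.2.insert p.2 (p.2 * p.1 - st.1 +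
                ((PySem.List.sorted arr (fun x => x) false).sum - st.1) -
                p.2 * (((PySem.List.sorted arr (fun x => x) false).length : Int) - p.1))))
            (0, PySem.Dict.empty)).2.getD t 0), t)
        | some m => if (((PySem.List.enumerate (PySem.List.sorted arr (fun x => x) false) 0).foldl
            (fun (st : Int × PySem.Dict Int Int) p =>
              (st.1 + p.2, st.2.insert p.2 (p.2 * p.1 - st.1 +
                ((PySem.List.sorted arr (fun x => x) false).sum - st.1) -
                p.2 * (((PySem.List.sorted arr (fun x => x) false).length : Int) - p.1))))
            (0, PySem.Dict.empty)).2.getD t 0) < m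
          then (some (((PySem.List.enumerate (PySem.List.sorted arr (fun x => x) false) 0).foldl
            (fun (st : Int × PySem.Dict Int Int) p =>
              (st.1 + p.2, st.2.insert p.2 (p.2 * p.1 - st.1 +
                ((PySem.List.sorted arr (fun x => x) false).sum - st.1) -
                p.2 * (((PySem.List.sorted arr (fun x => x) false).length : Int) - p.1))))
            (0, PySem.Dict.empty)).2.getD t 0), t) else st)
        ((none : Option Int), -1) := by
    apply PySem.List.foldl_congr_mem
    intro acc x hx
    rw [hlook x hx]
  rw [hfold]

-- ===== VERDICT (by name: the statement is the Claim_ definition above) =====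
theorem min_steps_to_equal_spec : Claim_equal_min_steps_to_equal := by
  intro arr _ _
  unfold Spec_min_steps_to_equal
  exact pv_main arr
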